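-- pv_equiv track=rewrite | github.com/thealper2/codewars-solutions | 7-kyu/fun_with_binary_numbers.py | solution
-- ===== SOURCE A (Python) =====
-- def solution(n,b):
--     if b == 0:
--         return []
--
--     max_num = (1 << n) - 1
--     result = []
--     for num in range(max_num + 1):
--         if num & b:
--             result.append(num)
--
--     return result
-- ===== SOURCE B (Python) =====
-- def solution(n, b):
--     # Doubling construction: extend the answer for k low bits to k+1 low bits.
--     # If bit k of b is set, the whole upper half [2^k, 2^(k+1)) qualifies;
--     # otherwise an upper-half number qualifies iff its low part already did.
--     result = []
--     size = 1
--     for k in range(n):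
--         if (b >> k) & 1:
--             result = result + list(range(size, 2 * size))
--         else:
--             result = result + [size + y for y in result]
--         size *= 2
--     return result
-- ===== Notes on version B (the rewrite author's own statement) =====
-- stated objective: alternative
-- what changed: B replaces A's linear scan of all 2^n numbers testing num & b by a doubling construction over the bits of b: the answer for k+1 low bits is the answer for k low bits plus either the whole upper half (bit k of b set) or a shifted copy of the answer so far (bit k unset), so no per-number AND test is performed.
import Mathlib
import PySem

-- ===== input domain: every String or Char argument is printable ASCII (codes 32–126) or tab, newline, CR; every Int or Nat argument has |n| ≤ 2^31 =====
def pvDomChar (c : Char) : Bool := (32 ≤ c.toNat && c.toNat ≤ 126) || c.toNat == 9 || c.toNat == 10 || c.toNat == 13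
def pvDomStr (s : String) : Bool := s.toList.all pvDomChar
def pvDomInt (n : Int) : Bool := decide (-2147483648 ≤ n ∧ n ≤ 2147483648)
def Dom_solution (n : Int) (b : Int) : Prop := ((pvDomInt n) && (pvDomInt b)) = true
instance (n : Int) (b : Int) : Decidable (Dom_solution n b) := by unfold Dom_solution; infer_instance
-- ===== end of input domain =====

-- B replaces A's scan of all 2^n numbers testing `num & b` by a doubling construction over the
-- bits of b (extend the answer for k low bits to k+1 low bits); objective: alternative algorithm.


-- ===== PORT A =====
def solution (n : Int) (b : Int) : List Int :=
  if b = 0 then []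
  else
    -- 1 << n : exact for 0 ≤ n; for n < 0 Python raises ValueError (excluded by Pre_solution)
    let maxNum : Int := ((1 : Int) <<< n.toNat) - 1
    (PySem.List.pyRange 0 (maxNum + 1) 1).foldl
      (fun result num => if PySem.Int.band num b ≠ 0 then result ++ [num] else result) []

-- ===== PORT B =====
-- loop body of B: one step of the doubling construction (k ≥ 0 always, so k.toNat is exact)
def altStep (b : Int) (st : List Int × Int) (k : Int) : List Int × Int :=
  let result := st.1
  let size := st.2
  let result :=
    if PySem.Int.band (b >>> k.toNat) 1 ≠ 0 then
      result ++ PySem.List.pyRange size (2 * size) 1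
    else
      result ++ result.map (fun y => size + y)
  (result, 2 * size)

def solution_alt (n : Int) (b : Int) : List Int :=
  ((PySem.List.pyRange 0 n 1).foldl (altStep b) ([], 1)).1

-- ===== PRECONDITION & SPEC =====
-- Excluded: n < 0 with b ≠ 0, where A raises ValueError ("negative shift count"); B returns [] there.
def Pre_solution (n : Int) (b : Int) : Prop := 0 ≤ n ∨ b = 0
instance (n : Int) (b : Int) : Decidable (Pre_solution n b) := by unfold Pre_solution; infer_instance
def pvWitness_solution : Int × Int := (3, 5)

def Spec_solution (n : Int) (b : Int) (out : List Int) : Prop := out = solution_alt n b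
instance (n : Int) (b : Int) (out : List Int) : Decidable (Spec_solution n b out) := by unfold Spec_solution; infer_instance

-- ===== CLAIM (what is proved, stated in full; the proofs are below) =====
def Claim_equal_solution : Prop := ∀ (n : Int) (b : Int), Dom_solution n b → Pre_solution n b → Spec_solution n b (solution n b)

-- ===== LEMMAS AND PROOFS =====

-- the answer restricted to the numbers with m low bits: the common value both programs compute
def lowSol (b : Int) (m : Nat) : List Int :=
  ((List.range (2^m)).filter (fun t : Nat => decide (PySem.Int.band (t : Int) b ≠ 0))).map
    (fun t : Nat => ((t : Nat) : Int))

-- b = 0: B's accumulator stays empty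
theorem altStep_zero_nil (l : List Int) (s : Int) :
    (l.foldl (altStep 0) ([], s)).1 = [] := by
  induction l generalizing s with
  | nil => rfl
  | cons k l ih =>
      have h0 : PySem.Int.band ((0 : Int) >>> k.toNat) 1 = 0 := by
        rw [show ((0 : Int) >>> k.toNat) = 0 by simp, PySem.Int.band_comm, PySem.Int.band_zero]
      simp only [List.foldl_cons, altStep, h0, ne_eq, not_true_eq_false, if_false,
        List.map_nil, List.append_nil]
      exact ih _

theorem nat_or_eq_zero (x y : Nat) : x ||| y = 0 ↔ x = 0 ∧ y = 0 := by
  constructor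
  · intro h
    have hx := Nat.left_le_or (n := x) (m := y)
    have hy := Nat.right_le_or (n := x) (m := y)
    omega
  · rintro ⟨rfl, rfl⟩; rfl

theorem nat_and_split (c m t : Nat) (ht : t < 2^m) :
    (2^m + t) &&& c = (2^m * (c.testBit m).toNat) ||| (t &&& c) := by
  have h := Nat.two_pow_add_eq_or_of_lt (i := m) ht 1
  rw [Nat.mul_one] at h
  rw [h, Nat.and_or_distrib_right, Nat.two_pow_and]

theorem natN1 (c m t : Nat) (ht : t < 2^m) :
    (2^m + t) &&& c = 0 ↔ (c.testBit m = false ∧ t &&& c = 0) := by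
  rw [nat_and_split c m t ht, nat_or_eq_zero]
  have hp : 0 < 2^m := Nat.two_pow_pos m
  cases h : c.testBit m
  · simp
  · simp only [Bool.toNat_true, Nat.mul_one]
    constructor
    · rintro ⟨h1, _⟩; omega
    · rintro ⟨h1, _⟩; exact absurd h1 (by simp)

theorem natN2 (c m t : Nat) (ht : t < 2^m) :
    (2^m + t) &&& c = 2^m + t ↔ (c.testBit m = true ∧ t &&& c = t) := by
  rw [nat_and_split c m t ht]
  have hle : t &&& c ≤ t := Nat.and_le_left
  cases h : c.testBit m
  · simp only [Bool.toNat_false, Nat.mul_zero, Nat.zero_or]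
    constructor
    · intro he; omega
    · rintro ⟨he, _⟩; cases he
  · simp only [Bool.toNat_true, Nat.mul_one]
    have hlt : t &&& c < 2^m := lt_of_le_of_lt hle ht
    have h2 := Nat.two_pow_add_eq_or_of_lt (i := m) hlt 1
    rw [Nat.mul_one] at h2
    rw [← h2]
    constructor
    · intro he; exact ⟨by trivial, by omega⟩
    · rintro ⟨_, he⟩; omega

theorem band_negSucc (a c : Nat) :
    PySem.Int.band (a : Int) (Int.negSucc c) = ((a - (a &&& c) : Nat) : Int) := by
  simp [PySem.Int.band, Int.negSucc_eq]
  omega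

theorem cond_ofNat (c m : Nat) :
    (PySem.Int.band (((c : Nat) : Int) >>> m) 1 ≠ 0) ↔ c.testBit m = true := by
  rw [show (((c : Nat) : Int) >>> m) = ((c >>> m : Nat) : Int) from rfl,
    show (1 : Int) = ((1 : Nat) : Int) from rfl, PySem.Int.band_natCast,
    Nat.and_one_is_mod, ← Nat.decide_shiftRight_mod_two_eq_one]
  simp only [ne_eq, Nat.cast_eq_zero, decide_eq_true_eq]
  omega

theorem cond_negSucc (c m : Nat) :
    (PySem.Int.band ((Int.negSucc c) >>> m) 1 ≠ 0) ↔ c.testBit m = false := by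
  rw [show ((Int.negSucc c) >>> m) = Int.negSucc (c >>> m) from rfl, PySem.Int.band_comm,
    show (1 : Int) = ((1 : Nat) : Int) from rfl, band_negSucc,
    Nat.one_and_eq_mod_two, ← Nat.decide_shiftRight_mod_two_eq_one]
  simp only [ne_eq, Nat.cast_eq_zero, decide_eq_false_iff_not]
  omega

theorem P_split (b : Int) (m t : Nat) (ht : t < 2^m) :
    (PySem.Int.band ((2^m + t : Nat) : Int) b ≠ 0) ↔
      ((PySem.Int.band (b >>> m) 1 ≠ 0) ∨ (PySem.Int.band ((t : Nat) : Int) b ≠ 0)) := by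
  cases b with
  | ofNat c =>
      rw [show (Int.ofNat c) = ((c : Nat) : Int) from rfl, PySem.Int.band_natCast,
        PySem.Int.band_natCast, cond_ofNat]
      have h := natN1 c m t ht
      simp only [ne_eq, Nat.cast_eq_zero]
      constructor
      · intro hne
        by_cases hbit : c.testBit m = true
        · exact Or.inl hbit
        · refine Or.inr ?_
          intro h0
          exact hne (h.mpr ⟨by simpa using hbit, h0⟩)
      · rintro (hbit | hne) h0
        · rcases h.mp h0 with ⟨hf, _⟩; rw [hbit] at hf; cases hf
        · rcases h.mp h0 with ⟨_, h1⟩; exact hne h1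
  | negSucc c =>
      rw [band_negSucc, band_negSucc, cond_negSucc]
      have h := natN2 c m t ht
      have hle1 : (2^m + t) &&& c ≤ 2^m + t := Nat.and_le_left
      have hle2 : t &&& c ≤ t := Nat.and_le_left
      simp only [ne_eq, Nat.cast_eq_zero]
      constructor
      · intro hne
        by_cases hbit : c.testBit m = true
        · refine Or.inr ?_
          intro h0
          exact hne (by have := h.mpr ⟨hbit, by omega⟩; omega)
        · exact Or.inl (by simpa using hbit)
      · rintro (hbit | hne) h0
        · have := h.mp (by omega)
          rw [hbit] at this; exact absurd this.1 (by simp)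
        · have := h.mp (by omega)
          exact hne (by omega)

theorem pyRange_block (s : Nat) :
    PySem.List.pyRange (s : Int) (2 * (s : Int)) 1 =
      (List.range s).map (fun t => ((s + t : Nat) : Int)) := by
  rw [PySem.List.pyRange_of_pos _ _ (by norm_num)]
  rcases Nat.eq_zero_or_pos s with rfl | hs
  · simp
  · have hlt : (s : Int) < 2 * (s : Int) := by omega
    rw [if_pos hlt]
    have : ((2 * (s : Int) - (s : Int) + 1 - 1) / 1).toNat = s := by
      simp
      omega
    rw [this]
    apply List.map_congr_left
    intro t _
    push_cast
    ring

theorem B_inv (b : Int) (m : Nat) :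
    ((List.range m).foldl (fun st (k : Nat) => altStep b st ((k : Nat) : Int)) ([], 1)) =
      (lowSol b m, ((2^m : Nat) : Int)) := by
  induction m with
  | zero =>
      have h0 : PySem.Int.band (0 : Int) b = 0 := by
        rw [PySem.Int.band_comm, PySem.Int.band_zero]
      simp [lowSol, List.range_one, h0]
  | succ m ih =>
      rw [List.range_succ, List.foldl_append, ih]
      simp only [List.foldl_cons, List.foldl_nil]
      show altStep b (lowSol b m, ((2^m : Nat) : Int)) ((m : Nat) : Int) =
        (lowSol b (m+1), ((2^(m+1) : Nat) : Int))
      have hsz : (2 : Int) * ((2^m : Nat) : Int) = ((2^(m+1) : Nat) : Int) := by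
        push_cast [pow_succ]; ring
      have hnat : ((m : Nat) : Int).toNat = m := Int.toNat_natCast m
      have hsplit : List.range (2^(m+1)) =
          List.range (2^m) ++ (List.range (2^m)).map (fun t => 2^m + t) := by
        rw [show 2^(m+1) = 2^m + 2^m by ring, List.range_add]
      by_cases hc : PySem.Int.band (b >>> m) 1 ≠ 0
      · have hup : lowSol b (m+1) = lowSol b m ++
            (List.range (2^m)).map (fun t => ((2^m + t : Nat) : Int)) := by
          unfold lowSol
          rw [hsplit, List.filter_append, List.map_append, List.filter_map]
          congr 1
          have hall : List.filter
              ((fun t : Nat => decide (PySem.Int.band (t : Int) b ≠ 0)) ∘ (fun t : Nat => 2^m + t))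
              (List.range (2^m)) = List.range (2^m) := by
            apply List.filter_eq_self.mpr
            intro t htm
            rw [List.mem_range] at htm
            simp only [Function.comp_apply, decide_eq_true_eq]
            exact (P_split b m t htm).mpr (Or.inl hc)
          rw [hall, List.map_map]
          simp [Function.comp]
        simp only [altStep]
        rw [hnat, if_pos hc, pyRange_block, hsz, hup]
      · have hup : lowSol b (m+1) = lowSol b m ++
            (lowSol b m).map (fun y => ((2^m : Nat) : Int) + y) := by
          unfold lowSol
          rw [hsplit, List.filter_append, List.map_append, List.filter_map]
          congr 1
          have hcong : List.filter
              ((fun t : Nat => decide (PySem.Int.band (t : Int) b ≠ 0)) ∘ (fun t : Nat => 2^m + t))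
              (List.range (2^m)) =
              List.filter (fun t : Nat => decide (PySem.Int.band (t : Int) b ≠ 0))
                (List.range (2^m)) := by
            apply List.filter_congr
            intro t htm
            rw [List.mem_range] at htm
            have ht : t < 2^m := htm
            simp only [Function.comp_apply, decide_eq_decide]
            constructor
            · intro h
              rcases (P_split b m t ht).mp (by exact_mod_cast h) with h' | h'
              · exact absurd h' hc
              · exact_mod_cast h'
            · intro h
              exact_mod_cast (P_split b m t ht).mpr (Or.inr (by exact_mod_cast h))
          rw [hcong, List.map_map, List.map_map]
          apply List.map_congr_left
          intro t _
          simp only [Function.comp_apply]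
          push_cast
          ring
        simp only [altStep]
        rw [hnat, if_neg hc, hsz, hup]

theorem A_char (b : Int) (hb : b ≠ 0) (m : Nat) :
    solution ((m : Nat) : Int) b = lowSol b m := by
  unfold solution
  rw [if_neg hb]
  show (PySem.List.pyRange 0 (((1 : Int) <<< ((m : Nat) : Int).toNat - 1) + 1)).foldl
      (fun result num => if PySem.Int.band num b ≠ 0 then result ++ [num] else result) [] =
    lowSol b m
  have hsh : ((1 : Int) <<< ((m : Nat) : Int).toNat) - 1 + 1 = ((2^m : Nat) : Int) := by
    rw [Int.toNat_natCast]
    have : ((1 : Int) <<< m) = ((2^m : Nat) : Int) := by simp [Int.shiftLeft_eq]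
    omega
  rw [hsh, PySem.List.pyRange_zero_natCast, List.foldl_map]
  have hf : (fun (result : List Int) (t : Nat) =>
        if PySem.Int.band ((t : Nat) : Int) b ≠ 0 then result ++ [((t : Nat) : Int)] else result) =
      (fun (acc : List Int) (t : Nat) =>
        if (fun t => decide (PySem.Int.band ((t : Nat) : Int) b ≠ 0)) t = true
          then acc ++ [((t : Nat) : Int)] else acc) := by
    funext acc t
    simp
  rw [hf, PySem.List.foldl_append_if]
  simp [lowSol]

theorem B_char (b : Int) (m : Nat) :
    solution_alt ((m : Nat) : Int) b = lowSol b m := by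
  unfold solution_alt
  rw [PySem.List.pyRange_zero_natCast, List.foldl_map, B_inv]

-- ===== VERDICT (by name: the statement is the Claim_ definition above) =====
theorem solution_spec : Claim_equal_solution := by
  intro n b _ hpre
  unfold Spec_solution
  by_cases hb : b = 0
  · subst hb
    rw [show solution n 0 = [] by simp [solution]]
    unfold solution_alt
    exact (altStep_zero_nil _ _).symm
  · have hn : 0 ≤ n := hpre.resolve_right hb
    obtain ⟨m, rfl⟩ := Int.eq_ofNat_of_zero_le hn
    rw [A_char b hb m, B_char b m]
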